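-- pv_equiv track=rewrite | github.com/tren03/AOC2024 | day1/code/part2.py | get_split_numbers
-- ===== SOURCE A (Python) =====
-- from typing import Dict, List, Tuple
--
-- def get_split_numbers(str_number: str) -> Tuple[int, int]:
--     flag: bool = True
--     number_1: str = ""
--     number_2: str = ""
--     for i in str_number:
--         try:
--             nos: int = int(i)
--             if flag == True:
--                 number_1 += i
--             else:
--                 number_2 += i
--         except ValueError:
--             # if flag = false, we have finished processing our first number, and we are in second number processing
--             flag = False
--             continue
--
--     return (int(number_1), int(number_2))
-- ===== SOURCE B (Python) =====
-- def get_split_numbers(str_number):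
--     def is_digit(c):
--         try:
--             int(c)
--             return True
--         except ValueError:
--             return False
--     idx = 0
--     while idx < len(str_number) and is_digit(str_number[idx]):
--         idx += 1
--     number_1 = str_number[:idx]
--     number_2 = "".join(c for c in str_number[idx + 1:] if is_digit(c))
--     return (int(number_1), int(number_2))
-- ===== Notes on version B (the rewrite author's own statement) =====
-- stated objective: simpler
-- what changed: Replaces A's flag-driven state-machine loop over all characters with a boundary-first decomposition: find the index of the first non-digit, slice the prefix as the first number, and filter the digits out of the suffix after it for the second number.
import Mathlib
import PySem

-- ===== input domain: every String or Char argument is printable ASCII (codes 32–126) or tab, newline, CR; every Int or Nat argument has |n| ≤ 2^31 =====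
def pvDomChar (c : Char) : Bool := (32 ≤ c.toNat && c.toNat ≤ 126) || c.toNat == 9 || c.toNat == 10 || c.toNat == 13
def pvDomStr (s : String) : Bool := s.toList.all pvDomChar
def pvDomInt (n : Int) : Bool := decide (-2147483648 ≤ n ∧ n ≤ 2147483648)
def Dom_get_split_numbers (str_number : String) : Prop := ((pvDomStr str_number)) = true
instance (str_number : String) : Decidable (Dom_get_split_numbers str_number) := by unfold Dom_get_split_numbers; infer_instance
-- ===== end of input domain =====

-- B replaces A's flag-driven state-machine loop by a boundary-first decomposition
-- (prefix slice up to the first non-digit, then a digit filter of the suffix); objective: simpler.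

-- ===== PORT A =====
-- On the ASCII domain, Python's `int(i)` on a single character succeeds exactly for '0'..'9',
-- i.e. Char.isDigit; the try/except is that test.
def pvStepA (st : Bool × List Char × List Char) (c : Char) : Bool × List Char × List Char :=
  if c.isDigit then
    (if st.1 then (st.1, st.2.1 ++ [c], st.2.2) else (st.1, st.2.1, st.2.2 ++ [c]))
  else (false, st.2.1, st.2.2)

def get_split_numbers (str_number : String) : Int × Int :=
  let st := str_number.toList.foldl pvStepA (true, [], [])
  ((PySem.Int.ofStr? (String.mk st.2.1)).getD 0, (PySem.Int.ofStr? (String.mk st.2.2)).getD 0)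

-- ===== PORT B =====
-- idx = index of the first non-digit (B's while loop) = length of the digit prefix;
-- number_1 = s[:idx]; number_2 = digits filtered out of s[idx+1:].
def get_split_numbers_alt (str_number : String) : Int × Int :=
  let cs := str_number.toList
  let idx := (cs.takeWhile Char.isDigit).length
  let number_1 := cs.take idx
  let number_2 := (cs.drop (idx + 1)).filter Char.isDigit
  ((PySem.Int.ofStr? (String.mk number_1)).getD 0, (PySem.Int.ofStr? (String.mk number_2)).getD 0)

-- ===== PRECONDITION & SPEC =====
-- Pre_ excludes exactly the inputs on which Python A raises ValueError (empty int literal):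
-- no leading digit, or no digit after the first non-digit (B raises there too).
def Pre_get_split_numbers (str_number : String) : Prop :=
  str_number.toList.takeWhile Char.isDigit ≠ [] ∧
  (str_number.toList.drop ((str_number.toList.takeWhile Char.isDigit).length + 1)).filter Char.isDigit ≠ []
instance (str_number : String) : Decidable (Pre_get_split_numbers str_number) := by
  unfold Pre_get_split_numbers; infer_instance

def pvWitness_get_split_numbers : String := "12 34"

def Spec_get_split_numbers (str_number : String) (out : Int × Int) : Prop := out = get_split_numbers_alt str_number
instance (str_number : String) (out : Int × Int) : Decidable (Spec_get_split_numbers str_number out) := by unfold Spec_get_split_numbers; infer_instance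

-- ===== CLAIM (what is proved, stated in full; the proofs are below) =====
def Claim_equal_get_split_numbers : Prop := ∀ (str_number : String), Dom_get_split_numbers str_number → Pre_get_split_numbers str_number → Spec_get_split_numbers str_number (get_split_numbers str_number)

-- ===== LEMMAS AND PROOFS =====

-- Invariant of A's loop from an arbitrary state.
theorem pvFoldA_char (l : List Char) : ∀ (flag : Bool) (n1 n2 : List Char),
    l.foldl pvStepA (flag, n1, n2) =
      if flag then
        (l.all Char.isDigit, n1 ++ l.takeWhile Char.isDigit,
          n2 ++ ((l.drop ((l.takeWhile Char.isDigit).length + 1)).filter Char.isDigit))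
      else (false, n1, n2 ++ l.filter Char.isDigit) := by
  induction l with
  | nil => intro flag n1 n2; cases flag <;> simp
  | cons c t ih =>
    intro flag n1 n2
    by_cases hc : c.isDigit
    · cases flag with
      | true =>
        simp only [List.foldl_cons, pvStepA, hc, if_pos, if_true, ih, hc]
        simp [hc, List.takeWhile_cons, List.all_cons]
      | false =>
        simp only [List.foldl_cons, pvStepA, hc, if_pos, ih]
        simp [hc, List.filter_cons]
    · cases flag with
      | true =>
        simp only [List.foldl_cons, pvStepA, hc, if_neg, if_false, ih]
        simp [hc, List.takeWhile_cons, List.all_cons, List.filter_cons]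
      | false =>
        simp only [List.foldl_cons, pvStepA, hc, if_neg, ih]
        simp [hc, List.filter_cons]

theorem pvFoldA (l : List Char) :
    l.foldl pvStepA (true, [], []) =
      (l.all Char.isDigit, l.takeWhile Char.isDigit,
        (l.drop ((l.takeWhile Char.isDigit).length + 1)).filter Char.isDigit) := by
  rw [pvFoldA_char]; simp

-- take (takeWhile length) = takeWhile
theorem pvTakeIdx (l : List Char) :
    l.take ((l.takeWhile Char.isDigit).length) = l.takeWhile Char.isDigit := by
  induction l with
  | nil => simp
  | cons c t ih =>
    by_cases hc : c.isDigit <;> simp [List.takeWhile_cons, hc, ih]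

-- ===== VERDICT (by name: the statement is the Claim_ definition above) =====
theorem get_split_numbers_spec : Claim_equal_get_split_numbers := by
  intro s _ _
  unfold Spec_get_split_numbers get_split_numbers get_split_numbers_alt
  simp only [pvFoldA, pvTakeIdx]
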